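-- pv_equiv track=rewrite | github.com/healthonrails/annolid | annolid/core/behavior/catalog.py | normalize_behavior_code
-- ===== SOURCE A (Python) =====
-- from typing import Any, Dict, Iterable, List, Optional, Sequence, Tuple
--
-- def normalize_behavior_code(value: Any) -> str:
--     text = str(value or "").strip()
--     if not text:
--         return ""
--     normalized: List[str] = []
--     previous_underscore = False
--     for ch in text.lower():
--         if ch.isalnum():
--             normalized.append(ch)
--             previous_underscore = False
--         else:
--             if not previous_underscore:
--                 normalized.append("_")
--                 previous_underscore = True
--     return "".join(normalized).strip("_")
-- ===== SOURCE B (Python) =====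
-- def normalize_behavior_code(value):
--     text = str(value or "").strip()
--     s = text.lower()
--     n = len(s)
--     tokens = []
--     i = 0
--     while i < n:
--         if s[i].isalnum():
--             j = i
--             while j < n and s[j].isalnum():
--                 j += 1
--             tokens.append(s[i:j])
--             i = j
--         else:
--             i += 1
--     return "_".join(tokens)
-- ===== Notes on version B (the rewrite author's own statement) =====
-- stated objective: alternative
-- what changed: A emits output characters one by one under a previous_underscore flag and strips edge underscores at the end; B is a run scanner: an index loop that skips separators and slices out each maximal alphanumeric run as a token, then joins the tokens with underscores, so no flag and no final strip exist.
import Mathlib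
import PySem

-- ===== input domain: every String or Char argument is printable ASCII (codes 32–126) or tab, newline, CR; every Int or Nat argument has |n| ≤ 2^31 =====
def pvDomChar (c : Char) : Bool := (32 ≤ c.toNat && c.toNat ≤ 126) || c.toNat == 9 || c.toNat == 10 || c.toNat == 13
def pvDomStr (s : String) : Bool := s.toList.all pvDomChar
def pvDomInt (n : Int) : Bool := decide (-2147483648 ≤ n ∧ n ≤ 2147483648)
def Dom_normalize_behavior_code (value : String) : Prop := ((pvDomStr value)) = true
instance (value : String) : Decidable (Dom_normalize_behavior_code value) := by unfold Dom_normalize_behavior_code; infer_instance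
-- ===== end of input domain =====

-- B replaces A's character-emitting loop (previous_underscore flag + final strip('_')) by a run
-- scanner that slices out each maximal alphanumeric run as a token and joins the tokens (alternative; same cost).

-- ===== PORT A =====
-- For a String argument, `str(value or "")` is value itself ("" stays ""), so text = value.strip().
def normalize_behavior_code (value : String) : String :=
  let text := PySem.Chars.strip value.toList
  if text = [] then ""
  else
    let st := (PySem.Chars.lower text).foldl
      (fun (st : List Char × Bool) ch =>
        if PySem.Chars.isalnum ch then (st.1 ++ [ch], false)
        else if st.2 then st else (st.1 ++ ['_'], true))
      ([], false)
    String.ofList (PySem.Chars.stripChars st.1 ['_'])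

-- ===== PORT B =====
-- Source B's inner `while j < n and s[j].isalnum(): j += 1` plus the slice s[i:j]: the alnum run at the
-- front of the remaining suffix and the suffix after it (the index pair (i, j) is represented by the
-- suffix s[i:], which it determines; exact).
def pvRun : List Char → List Char × List Char
  | [] => ([], [])
  | c :: cs =>
      if PySem.Chars.isalnum c then
        let p := pvRun cs
        (c :: p.1, p.2)
      else ([], c :: cs)

theorem pvRun_snd_length_le : ∀ cs : List Char, (pvRun cs).2.length ≤ cs.length := by
  intro cs
  induction cs with
  | nil => simp [pvRun]
  | cons c cs ih =>
      by_cases h : PySem.Chars.isalnum c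
      · simp only [pvRun, h, if_pos]
        exact Nat.le_succ_of_le ih
      · simp [pvRun, h]

-- Source B's outer index loop `while i < n: …`, ported as recursion on the remaining suffix s[i:].
def pvScan : List Char → List (List Char)
  | [] => []
  | c :: cs =>
      if PySem.Chars.isalnum c then
        (pvRun (c :: cs)).1 :: pvScan (pvRun (c :: cs)).2
      else pvScan cs
termination_by s => s.length
decreasing_by
  · simp only [pvRun, *, if_pos]
    exact Nat.lt_succ_of_le (pvRun_snd_length_le cs)
  · simp

def normalize_behavior_code_alt (value : String) : String :=
  let text := PySem.Chars.strip value.toList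
  let s := PySem.Chars.lower text
  String.ofList (PySem.Chars.join ['_'] (pvScan s))

-- ===== PRECONDITION & SPEC =====
def Spec_normalize_behavior_code (value : String) (out : String) : Prop := out = normalize_behavior_code_alt value
instance (value : String) (out : String) : Decidable (Spec_normalize_behavior_code value out) := by unfold Spec_normalize_behavior_code; infer_instance

-- ===== CLAIM (what is proved, stated in full; the proofs are below) =====
def Claim_equal_normalize_behavior_code : Prop := ∀ (value : String), Dom_normalize_behavior_code value → Spec_normalize_behavior_code value (normalize_behavior_code value)

-- ===== LEMMAS AND PROOFS =====

-- recursive form of A's loop (p = previous_underscore)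
def pvLa : List Char → Bool → List Char
  | [], _ => []
  | c :: cs, p =>
      if PySem.Chars.isalnum c then c :: pvLa cs false
      else if p then pvLa cs true else '_' :: pvLa cs true

-- proof-side token accumulator: the tokens pvScan will still emit, given the alnum run read so far
def pvTb : List Char → List Char → List (List Char)
  | [], cur => if cur = [] then [] else [cur]
  | c :: cs, cur =>
      if PySem.Chars.isalnum c then pvTb cs (cur ++ [c])
      else if cur = [] then pvTb cs [] else cur :: pvTb cs []

def pvU (c : Char) : Bool := [('_' : Char)].contains c

def pvPend : List Char → Bool → Bool
  | [], p => p
  | c :: cs, _ =>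
      if PySem.Chars.isalnum c then pvPend cs false else pvPend cs true

theorem pvU_alnum {c : Char} (h : PySem.Chars.isalnum c = true) : pvU c = false := by
  cases hpv : pvU c
  · rfl
  · have hc : c = '_' := by simpa [pvU] using hpv
    subst hc
    exact absurd h (by decide)

theorem pvLa_fold (cs : List Char) : ∀ (acc : List Char) (p : Bool),
    cs.foldl (fun (st : List Char × Bool) ch =>
        if PySem.Chars.isalnum ch then (st.1 ++ [ch], false)
        else if st.2 then st else (st.1 ++ ['_'], true)) (acc, p)
      = (acc ++ pvLa cs p, pvPend cs p) := by
  induction cs with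
  | nil => intro acc p; simp [pvLa, pvPend]
  | cons c cs ih =>
      intro acc p
      by_cases h : PySem.Chars.isalnum c
      · simp [pvLa, pvPend, h, List.foldl_cons, ih (acc ++ [c]) false]
      · by_cases hp : p = true
        · simp [pvLa, pvPend, h, hp, List.foldl_cons, ih acc true]
        · simp only [Bool.not_eq_true] at hp
          simp [pvLa, pvPend, h, hp, List.foldl_cons, ih (acc ++ ['_']) true]

def pvRstripU (s : List Char) : List Char := (List.dropWhile pvU s.reverse).reverse

theorem pvRstripU_append (a b : List Char) :
    pvRstripU (a ++ b) = if pvRstripU b = [] then pvRstripU a else a ++ pvRstripU b := by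
  unfold pvRstripU
  rw [List.reverse_append, List.dropWhile_append]
  by_cases h : List.dropWhile pvU b.reverse = []
  · simp [h]
  · simp [h, List.isEmpty_iff]

theorem pvRstripU_alnum (cur : List Char) (hne : cur ≠ []) (hall : ∀ a ∈ cur, PySem.Chars.isalnum a = true) :
    pvRstripU cur = cur := by
  unfold pvRstripU
  rcases List.eq_nil_or_concat cur with h | ⟨l, c, rfl⟩
  · exact absurd h hne
  · have hc : PySem.Chars.isalnum c = true := hall c (by simp)
    have : pvU c = false := pvU_alnum hc
    simp [List.reverse_append, this]

-- all tokens produced by pvTb from an all-alnum (possibly empty) cur are nonempty and all-alnum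
theorem pvTb_tokens (cs : List Char) : ∀ cur, (∀ a ∈ cur, PySem.Chars.isalnum a = true) →
    ∀ t ∈ pvTb cs cur, t ≠ [] ∧ ∀ a ∈ t, PySem.Chars.isalnum a = true := by
  induction cs with
  | nil =>
      intro cur hcur t ht
      by_cases h : cur = [] <;> simp [pvTb, h] at ht
      subst ht; exact ⟨h, hcur⟩
  | cons c cs ih =>
      intro cur hcur t ht
      by_cases h : PySem.Chars.isalnum c
      · refine ih (cur ++ [c]) ?_ t (by simpa [pvTb, h] using ht)
        intro a ha; rcases List.mem_append.mp ha with ha | ha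
        · exact hcur a ha
        · simp at ha; subst ha; exact h
      · by_cases hc : cur = []
        · exact ih [] (by simp) t (by simpa [pvTb, h, hc] using ht)
        · simp [pvTb, h, hc] at ht
          rcases ht with rfl | ht
          · exact ⟨hc, hcur⟩
          · exact ih [] (by simp) t ht

theorem pv_join_ne_nil (t : List Char) (ts : List (List Char)) (ht : t ≠ []) :
    List.intercalate [('_' : Char)] (t :: ts) ≠ [] := by
  cases ts with
  | nil => simpa [List.intercalate] using ht
  | cons u us =>
      have : List.intercalate [('_' : Char)] (t :: u :: us)
          = t ++ '_' :: List.intercalate [('_' : Char)] (u :: us) := by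
        simp [List.intercalate, List.intersperse]
      rw [this]
      rcases t with _ | ⟨x, xs⟩
      · simp
      · simp

-- K and G simultaneously: rstrip of A's mode-true output is the join of pvTb's tokens
theorem pvKG (cs : List Char) :
    pvRstripU (pvLa cs true) = List.intercalate [('_' : Char)] (pvTb cs [])
    ∧ ∀ cur, cur ≠ [] → (∀ a ∈ cur, PySem.Chars.isalnum a = true) →
        pvRstripU (cur ++ pvLa cs false) = List.intercalate [('_' : Char)] (pvTb cs cur) := by
  induction cs with
  | nil =>
      refine ⟨by simp [pvLa, pvTb, pvRstripU, List.intercalate], ?_⟩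
      intro cur hne hall
      simp [pvLa, pvTb, hne, List.intercalate, pvRstripU_alnum cur hne hall]
  | cons c cs ih =>
      obtain ⟨ihK, ihG⟩ := ih
      by_cases h : PySem.Chars.isalnum c
      · constructor
        · have := ihG [c] (by simp) (by simpa using h)
          simpa [pvLa, pvTb, h] using this
        · intro cur hne hall
          have hall' : ∀ a ∈ cur ++ [c], PySem.Chars.isalnum a = true := by
            intro a ha; rcases List.mem_append.mp ha with ha | ha
            · exact hall a ha
            · simp at ha; subst ha; exact h
          have := ihG (cur ++ [c]) (by simp) hall'
          simpa [pvLa, pvTb, h] using this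
      · have key : ∀ cur : List Char, cur ≠ [] → (∀ a ∈ cur, PySem.Chars.isalnum a = true) →
            pvRstripU (cur ++ '_' :: pvLa cs true)
              = List.intercalate [('_' : Char)] (cur :: pvTb cs []) := by
          intro cur hne hall
          have hsplit : pvRstripU (cur ++ '_' :: pvLa cs true)
              = if pvRstripU ('_' :: pvLa cs true) = [] then pvRstripU cur
                else cur ++ pvRstripU ('_' :: pvLa cs true) := pvRstripU_append cur _
          have hund : pvRstripU ('_' :: pvLa cs true)
              = if pvRstripU (pvLa cs true) = [] then [] else '_' :: pvRstripU (pvLa cs true) := by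
            have := pvRstripU_append ['_'] (pvLa cs true)
            simpa [pvRstripU, pvU] using this
          by_cases hz : pvTb cs [] = []
          · have hone : pvRstripU (pvLa cs true) = [] := by rw [ihK, hz]; simp [List.intercalate]
            rw [hund, if_pos hone] at hsplit
            rw [hsplit, if_pos rfl, pvRstripU_alnum cur hne hall, hz]
            simp [List.intercalate]
          · rcases List.exists_cons_of_ne_nil hz with ⟨t, ts, hts⟩
            have htne : t ≠ [] := (pvTb_tokens cs [] (by simp) t (by rw [hts]; simp)).1
            have hjoin_ne : pvRstripU (pvLa cs true) ≠ [] := by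
              rw [ihK, hts]; exact pv_join_ne_nil t ts htne
            rw [hund, if_neg hjoin_ne] at hsplit
            rw [hsplit, if_neg (by simp), ihK, hts]
            simp [List.intercalate, List.intersperse]
        constructor
        · simpa [pvLa, pvTb, h] using ihK
        · intro cur hne hall
          have := key cur hne hall
          simpa [pvLa, pvTb, h, hne] using this

-- leading-strip facts
theorem pvLa_true_head (cs : List Char) :
    List.dropWhile pvU (pvLa cs true) = pvLa cs true := by
  induction cs with
  | nil => simp [pvLa]
  | cons c cs ih =>
      by_cases h : PySem.Chars.isalnum c
      · simp [pvLa, h, pvU_alnum h]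
      · simpa [pvLa, h] using ih

theorem pvLstrip_la_false (cs : List Char) :
    List.dropWhile pvU (pvLa cs false) = pvLa cs true := by
  cases cs with
  | nil => simp [pvLa]
  | cons c cs =>
      by_cases h : PySem.Chars.isalnum c
      · simp [pvLa, h, pvU_alnum h]
      · have hu : pvU '_' = true := by decide
        simp [pvLa, h, hu, pvLa_true_head cs]

-- A's flagged output, stripped of underscores, is the join of pvTb's tokens
theorem pv_main (cs : List Char) :
    PySem.Chars.stripChars (pvLa cs false) ['_']
      = PySem.Chars.join ['_'] (pvTb cs []) := by
  show pvRstripU (List.dropWhile pvU (pvLa cs false)) = List.intercalate ['_'] (pvTb cs [])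
  rw [pvLstrip_la_false]
  exact (pvKG cs).1

-- B's run scanner produces exactly pvTb's tokens (mutual strong induction on length)
theorem pv_scan_tb_aux : ∀ n, ∀ cs : List Char, cs.length ≤ n →
    (pvScan cs = pvTb cs []) ∧
    ∀ cur, cur ≠ [] → pvTb cs cur = (cur ++ (pvRun cs).1) :: pvScan (pvRun cs).2 := by
  intro n
  induction n with
  | zero =>
      intro cs hcs
      have : cs = [] := List.length_eq_zero_iff.mp (Nat.le_zero.mp hcs)
      subst this
      refine ⟨by simp [pvScan, pvTb], ?_⟩
      intro cur hne
      simp [pvTb, pvRun, pvScan, hne]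
  | succ n ih =>
      intro cs hcs
      cases cs with
      | nil =>
          refine ⟨by simp [pvScan, pvTb], ?_⟩
          intro cur hne
          simp [pvTb, pvRun, pvScan, hne]
      | cons c cs =>
          have hlen : cs.length ≤ n := Nat.lt_succ_iff.mp (by simpa using hcs)
          obtain ⟨ihM, ihG⟩ := ih cs hlen
          by_cases h : PySem.Chars.isalnum c
          · constructor
            · rw [pvScan]
              have := ihG [c] (by simp)
              simp only [pvTb, h, if_pos, pvRun, List.nil_append] at this ⊢
              simpa using this.symm
            · intro cur hne
              have := ihG (cur ++ [c]) (by simp)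
              simp only [pvTb, h, if_pos, pvRun] at this ⊢
              simpa using this
          · constructor
            · rw [pvScan]
              simp [pvTb, h, ihM]
            · intro cur hne
              have hscan : pvScan (c :: cs) = pvScan cs := by rw [pvScan]; simp [h]
              simp [pvTb, pvRun, h, hne, hscan, ihM]

theorem pv_scan_eq_tb (cs : List Char) : pvScan cs = pvTb cs [] :=
  (pv_scan_tb_aux cs.length cs le_rfl).1

-- ===== VERDICT (by name: the statement is the Claim_ definition above) =====
theorem normalize_behavior_code_spec : Claim_equal_normalize_behavior_code := by
  intro value _
  unfold Spec_normalize_behavior_code normalize_behavior_code normalize_behavior_code_alt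
  by_cases h : PySem.Chars.strip value.toList = []
  · simp [h, PySem.Chars.lower, pvScan, PySem.Chars.join, List.intercalate]
  · rw [if_neg h]
    have ha := pvLa_fold (PySem.Chars.lower (PySem.Chars.strip value.toList)) [] false
    simp only [List.nil_append] at ha
    show String.ofList (PySem.Chars.stripChars
        ((PySem.Chars.lower (PySem.Chars.strip value.toList)).foldl
          (fun (st : List Char × Bool) ch =>
            if PySem.Chars.isalnum ch then (st.1 ++ [ch], false)
            else if st.2 then st else (st.1 ++ ['_'], true)) ([], false)).1 ['_'])
      = String.ofList (PySem.Chars.join ['_']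
          (pvScan (PySem.Chars.lower (PySem.Chars.strip value.toList))))
    rw [ha, pv_scan_eq_tb, pv_main]
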